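-- pv_equiv track=rewrite | github.com/AmanKtyr/Django-School-Management-System | SMS/apps/corecode/views.py | determine_department
-- ===== SOURCE A (Python) =====
-- def determine_department(subject_name):
--     """Helper function to determine department based on subject name"""
--     subject_name = subject_name.lower()
--
--     # Science subjects
--     if any(keyword in subject_name for keyword in ['physics', 'chemistry', 'biology', 'science']):
--         return 'Science'
--
--     # Mathematics subjects
--     elif any(keyword in subject_name for keyword in ['math', 'algebra', 'geometry', 'calculus']):
--         return 'Mathematics'
--
--     # Language subjects
--     elif any(keyword in subject_name for keyword in ['english', 'hindi', 'sanskrit', 'language', 'literature']):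
--         return 'Languages'
--
--     # Social Science subjects
--     elif any(keyword in subject_name for keyword in ['history', 'geography', 'civics', 'social', 'economics', 'political']):
--         return 'Social Sciences'
--
--     # Commerce subjects
--     elif any(keyword in subject_name for keyword in ['commerce', 'business', 'accounting', 'finance']):
--         return 'Commerce'
--
--     # Arts subjects
--     elif any(keyword in subject_name for keyword in ['art', 'music', 'dance', 'drama', 'painting']):
--         return 'Arts'
--
--     # Computer subjects
--     elif any(keyword in subject_name for keyword in ['computer', 'programming', 'it', 'information']):
--         return 'Computer Science'
--
--     # Default department
--     else:
--         return 'General'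
-- ===== SOURCE B (Python) =====
-- _TABLE = [
--     (['physics', 'chemistry', 'biology', 'science'], 0, 'Science'),
--     (['math', 'algebra', 'geometry', 'calculus'], 1, 'Mathematics'),
--     (['english', 'hindi', 'sanskrit', 'language', 'literature'], 2, 'Languages'),
--     (['history', 'geography', 'civics', 'social', 'economics', 'political'], 3, 'Social Sciences'),
--     (['commerce', 'business', 'accounting', 'finance'], 4, 'Commerce'),
--     (['art', 'music', 'dance', 'drama', 'painting'], 5, 'Arts'),
--     (['computer', 'programming', 'it', 'information'], 6, 'Computer Science'),
-- ]
--
-- # one flat keyword -> (priority, department) list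
-- _KEYWORDS = [(kw, rank, dept) for kws, rank, dept in _TABLE for kw in kws]
--
--
-- def determine_department(subject_name):
--     """Helper function to determine department based on subject name"""
--     s = subject_name.lower()
--     best_rank, best_dept = 7, 'General'
--     for kw, rank, dept in _KEYWORDS:
--         if rank < best_rank and kw in s:
--             best_rank, best_dept = rank, dept
--     return best_dept
-- ===== Notes on version B (the rewrite author's own statement) =====
-- stated objective: alternative
-- what changed: Replaced the first-match if/elif ladder over grouped keyword lists by a single pass over one flat keyword->(priority, department) table with a minimum-priority accumulator and no early return.
import Mathlib
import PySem

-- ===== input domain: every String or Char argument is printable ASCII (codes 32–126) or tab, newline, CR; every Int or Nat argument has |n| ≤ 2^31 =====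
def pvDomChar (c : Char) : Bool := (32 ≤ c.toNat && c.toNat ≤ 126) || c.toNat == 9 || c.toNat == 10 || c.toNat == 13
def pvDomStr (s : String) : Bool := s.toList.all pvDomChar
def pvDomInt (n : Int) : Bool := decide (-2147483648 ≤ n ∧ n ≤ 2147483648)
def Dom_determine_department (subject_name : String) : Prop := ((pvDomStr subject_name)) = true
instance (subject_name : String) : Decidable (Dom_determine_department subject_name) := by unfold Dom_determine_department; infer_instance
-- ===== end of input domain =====

-- One honest line: B replaces A's first-match if/elif ladder by a minimum-priority fold over one flat keyword table (alternative algorithm, same cost).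

-- ===== PORT A =====
def determine_department (subject_name : String) : String :=
  let s := PySem.Str.lower subject_name
  if (["physics", "chemistry", "biology", "science"].any fun k => PySem.Str.isIn k s) then "Science"
  else if (["math", "algebra", "geometry", "calculus"].any fun k => PySem.Str.isIn k s) then "Mathematics"
  else if (["english", "hindi", "sanskrit", "language", "literature"].any fun k => PySem.Str.isIn k s) then "Languages"
  else if (["history", "geography", "civics", "social", "economics", "political"].any fun k => PySem.Str.isIn k s) then "Social Sciences"
  else if (["commerce", "business", "accounting", "finance"].any fun k => PySem.Str.isIn k s) then "Commerce"
  else if (["art", "music", "dance", "drama", "painting"].any fun k => PySem.Str.isIn k s) then "Arts"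
  else if (["computer", "programming", "it", "information"].any fun k => PySem.Str.isIn k s) then "Computer Science"
  else "General"

-- ===== PORT B =====
-- the grouped source table (Source B's _TABLE)
def pvTable : List (List String × Nat × String) :=
  [(["physics", "chemistry", "biology", "science"], 0, "Science"),
   (["math", "algebra", "geometry", "calculus"], 1, "Mathematics"),
   (["english", "hindi", "sanskrit", "language", "literature"], 2, "Languages"),
   (["history", "geography", "civics", "social", "economics", "political"], 3, "Social Sciences"),
   (["commerce", "business", "accounting", "finance"], 4, "Commerce"),
   (["art", "music", "dance", "drama", "painting"], 5, "Arts"),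
   (["computer", "programming", "it", "information"], 6, "Computer Science")]

-- the flat keyword -> (priority, department) list (Source B's _KEYWORDS comprehension)
def pvKeywords : List (String × Nat × String) :=
  pvTable.flatMap (fun g => g.1.map (fun kw => (kw, g.2.1, g.2.2)))

-- one loop step of Source B: keep the entry of smallest priority whose keyword occurs in s
def pvStep (s : String) (best : Nat × String) (e : String × Nat × String) : Nat × String :=
  if e.2.1 < best.1 && PySem.Str.isIn e.1 s then e.2 else best

def determine_department_alt (subject_name : String) : String :=
  let s := PySem.Str.lower subject_name
  (pvKeywords.foldl (pvStep s) (7, "General")).2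

-- ===== PRECONDITION & SPEC =====
def Spec_determine_department (subject_name : String) (out : String) : Prop := out = determine_department_alt subject_name
instance (subject_name : String) (out : String) : Decidable (Spec_determine_department subject_name out) := by unfold Spec_determine_department; infer_instance

-- ===== CLAIM (what is proved, stated in full; the proofs are below) =====
def Claim_equal_determine_department : Prop := ∀ (subject_name : String), Dom_determine_department subject_name → Spec_determine_department subject_name (determine_department subject_name)

-- ===== LEMMAS AND PROOFS =====

-- once the accumulator's priority is ≤ every remaining priority, the fold no longer moves
theorem pvStep_skip (s : String) (L : List (String × Nat × String)) (best : Nat × String)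
    (h : ∀ e ∈ L, best.1 ≤ e.2.1) : L.foldl (pvStep s) best = best := by
  induction L with
  | nil => rfl
  | cons e t ih =>
    have he : best.1 ≤ e.2.1 := h e (by simp)
    have hstep : pvStep s best e = best := by
      unfold pvStep
      rw [if_neg]
      simp [not_lt.mpr he]
    rw [List.foldl_cons, hstep]
    exact ih (fun e' h' => h e' (by simp [h']))

-- folding one group of keywords sharing (r, d), from an accumulator of larger priority,
-- yields (r, d) iff some keyword of the group occurs in s
theorem pvStep_group (s : String) (kws : List String) (r : Nat) (d : String) (best : Nat × String)
    (h : r < best.1) :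
    (kws.map (fun kw => (kw, r, d))).foldl (pvStep s) best
      = if kws.any (fun k => PySem.Str.isIn k s) then (r, d) else best := by
  induction kws with
  | nil => simp
  | cons k t ih =>
    rw [List.map_cons, List.foldl_cons, List.any_cons]
    cases hk : PySem.Str.isIn k s with
    | true =>
      have hstep : pvStep s best (k, r, d) = (r, d) := by
        unfold pvStep; rw [hk]; simp [h]
      rw [hstep, pvStep_skip s _ (r, d) (by simp), Bool.true_or, if_pos rfl]
    | false =>
      have hstep : pvStep s best (k, r, d) = best := by
        unfold pvStep; rw [hk]; simp
      rw [hstep, ih, Bool.false_or]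

-- ===== VERDICT (by name: the statement is the Claim_ definition above) =====
theorem determine_department_spec : Claim_equal_determine_department := by
  intro subject_name _
  unfold Spec_determine_department determine_department determine_department_alt
  simp only []
  generalize PySem.Str.lower subject_name = s
  rw [show pvKeywords
      = (["physics", "chemistry", "biology", "science"].map (fun kw => (kw, (0 : Nat), "Science")))
      ++ (["math", "algebra", "geometry", "calculus"].map (fun kw => (kw, (1 : Nat), "Mathematics")))
      ++ (["english", "hindi", "sanskrit", "language", "literature"].map (fun kw => (kw, (2 : Nat), "Languages")))
      ++ (["history", "geography", "civics", "social", "economics", "political"].map (fun kw => (kw, (3 : Nat), "Social Sciences")))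
      ++ (["commerce", "business", "accounting", "finance"].map (fun kw => (kw, (4 : Nat), "Commerce")))
      ++ (["art", "music", "dance", "drama", "painting"].map (fun kw => (kw, (5 : Nat), "Arts")))
      ++ (["computer", "programming", "it", "information"].map (fun kw => (kw, (6 : Nat), "Computer Science")))
      from by rfl]
  simp only [List.foldl_append]
  cases h0 : (["physics", "chemistry", "biology", "science"].any fun k => PySem.Str.isIn k s) with
  | true =>
    rw [pvStep_group s _ 0 _ _ (by norm_num), h0, if_pos (rfl : true = true), if_pos (rfl : true = true),
        pvStep_skip s _ (0, "Science") (fun e _ => Nat.zero_le _),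
        pvStep_skip s _ (0, "Science") (fun e _ => Nat.zero_le _),
        pvStep_skip s _ (0, "Science") (fun e _ => Nat.zero_le _),
        pvStep_skip s _ (0, "Science") (fun e _ => Nat.zero_le _),
        pvStep_skip s _ (0, "Science") (fun e _ => Nat.zero_le _),
        pvStep_skip s _ (0, "Science") (fun e _ => Nat.zero_le _)]
  | false =>
    rw [pvStep_group s _ 0 _ _ (by norm_num), h0, if_neg Bool.false_ne_true, if_neg Bool.false_ne_true]
    cases h1 : (["math", "algebra", "geometry", "calculus"].any fun k => PySem.Str.isIn k s) with
    | true =>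
      rw [pvStep_group s _ 1 _ _ (by norm_num), h1, if_pos (rfl : true = true), if_pos (rfl : true = true),
          pvStep_skip s _ (1, "Mathematics") (by simp),
          pvStep_skip s _ (1, "Mathematics") (by simp),
          pvStep_skip s _ (1, "Mathematics") (by simp),
          pvStep_skip s _ (1, "Mathematics") (by simp),
          pvStep_skip s _ (1, "Mathematics") (by simp)]
    | false =>
      rw [pvStep_group s _ 1 _ _ (by norm_num), h1, if_neg Bool.false_ne_true, if_neg Bool.false_ne_true]
      cases h2 : (["english", "hindi", "sanskrit", "language", "literature"].any fun k => PySem.Str.isIn k s) with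
      | true =>
        rw [pvStep_group s _ 2 _ _ (by norm_num), h2, if_pos (rfl : true = true), if_pos (rfl : true = true),
            pvStep_skip s _ (2, "Languages") (by simp),
            pvStep_skip s _ (2, "Languages") (by simp),
            pvStep_skip s _ (2, "Languages") (by simp),
            pvStep_skip s _ (2, "Languages") (by simp)]
      | false =>
        rw [pvStep_group s _ 2 _ _ (by norm_num), h2, if_neg Bool.false_ne_true, if_neg Bool.false_ne_true]
        cases h3 : (["history", "geography", "civics", "social", "economics", "political"].any fun k => PySem.Str.isIn k s) with
        | true =>
          rw [pvStep_group s _ 3 _ _ (by norm_num), h3, if_pos (rfl : true = true), if_pos (rfl : true = true),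
              pvStep_skip s _ (3, "Social Sciences") (by simp),
              pvStep_skip s _ (3, "Social Sciences") (by simp),
              pvStep_skip s _ (3, "Social Sciences") (by simp)]
        | false =>
          rw [pvStep_group s _ 3 _ _ (by norm_num), h3, if_neg Bool.false_ne_true, if_neg Bool.false_ne_true]
          cases h4 : (["commerce", "business", "accounting", "finance"].any fun k => PySem.Str.isIn k s) with
          | true =>
            rw [pvStep_group s _ 4 _ _ (by norm_num), h4, if_pos (rfl : true = true), if_pos (rfl : true = true),
                pvStep_skip s _ (4, "Commerce") (by simp),
                pvStep_skip s _ (4, "Commerce") (by simp)]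
          | false =>
            rw [pvStep_group s _ 4 _ _ (by norm_num), h4, if_neg Bool.false_ne_true, if_neg Bool.false_ne_true]
            cases h5 : (["art", "music", "dance", "drama", "painting"].any fun k => PySem.Str.isIn k s) with
            | true =>
              rw [pvStep_group s _ 5 _ _ (by norm_num), h5, if_pos (rfl : true = true), if_pos (rfl : true = true),
                  pvStep_skip s _ (5, "Arts") (by simp)]
            | false =>
              rw [pvStep_group s _ 5 _ _ (by norm_num), h5, if_neg Bool.false_ne_true, if_neg Bool.false_ne_true]
              cases h6 : (["computer", "programming", "it", "information"].any fun k => PySem.Str.isIn k s) with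
              | true =>
                rw [pvStep_group s _ 6 _ _ (by norm_num), h6, if_pos (rfl : true = true), if_pos (rfl : true = true)]
              | false =>
                rw [pvStep_group s _ 6 _ _ (by norm_num), h6, if_neg Bool.false_ne_true, if_neg Bool.false_ne_true]
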